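-- pv_equiv track=rewrite | github.com/amirhamzakhan2001/nlp-email-categorization | streamlit.py | build_parent_prefixes
-- ===== SOURCE A (Python) =====
-- from typing import Dict, List, Optional
--
-- def build_parent_prefixes(cluster_ids: List[str]) -> List[str]:
--     """From list of cluster ids like 'root.1.1.2' build all prefixes (root, root.1, root.1.1, ...)"""
--     s = set()
--     for cid in cluster_ids:
--         if not cid:
--             continue
--         parts = cid.split(".")
--         for i in range(1, len(parts) + 1):
--             s.add(".".join(parts[:i]))
--     return sorted(list(s), key=lambda x: (x.count("."), x))
-- ===== SOURCE B (Python) =====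
-- def _chain(cid):
--     """cid and all its dot-boundary prefixes, longest first."""
--     j = cid.rfind(".")
--     return [cid] + (_chain(cid[:j]) if j >= 0 else [])
--
-- def build_parent_prefixes(cluster_ids):
--     """From list of cluster ids like 'root.1.1.2' build all prefixes (root, root.1, root.1.1, ...)"""
--     all_prefixes = [p for cid in cluster_ids if cid for p in _chain(cid)]
--     return sorted(set(all_prefixes), key=lambda x: (x.count("."), x))
-- ===== Notes on version B (the rewrite author's own statement) =====
-- stated objective: alternative
-- what changed: B recursively peels the last dot-component of each id with rfind (longest prefix down to shortest), concatenates all chains into one flat list and deduplicates once with set(...) at the end, instead of A's split into parts and re-join of every slice parts[:i] into an incrementally built set.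
import Mathlib
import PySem

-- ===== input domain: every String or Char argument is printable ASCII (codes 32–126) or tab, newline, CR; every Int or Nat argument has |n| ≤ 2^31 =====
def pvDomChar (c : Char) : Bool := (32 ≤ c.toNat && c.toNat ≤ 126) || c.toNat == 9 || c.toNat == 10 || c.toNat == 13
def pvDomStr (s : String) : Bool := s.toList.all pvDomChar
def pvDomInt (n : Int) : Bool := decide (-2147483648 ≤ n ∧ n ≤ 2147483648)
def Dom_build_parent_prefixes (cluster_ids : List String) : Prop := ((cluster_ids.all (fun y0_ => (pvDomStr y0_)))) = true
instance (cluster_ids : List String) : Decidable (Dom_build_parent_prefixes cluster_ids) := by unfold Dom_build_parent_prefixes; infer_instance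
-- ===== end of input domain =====

-- B peels the last dot-component of each id recursively with rfind, flattens all chains into one list and
-- deduplicates once with set(...) at the end, instead of A's split-into-parts + join of every slice into an incremental set.

-- ===== PORT A =====
def build_parent_prefixes (cluster_ids : List String) : List String :=
  let s : PySem.Set String := cluster_ids.foldl (fun s cid =>
    if cid = "" then s
    else
      let parts : List (List Char) := PySem.Chars.splitOn cid.toList ['.']
      (PySem.List.pyRange 1 ((parts.length : Int) + 1) 1).foldl
        (fun s i => PySem.Set.add s
          (String.ofList (PySem.Chars.join ['.'] (PySem.List.slice parts none (some i))))) s)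
    PySem.Set.empty
  PySem.List.sorted2 s (fun x => (PySem.Str.count x "." : Int)) (fun x => x)

-- ===== PORT B =====
-- termination fact for pvChain: a found '.' lies strictly inside cid, so the slice is shorter
theorem pv_rfind_go_le (s : List Char) (n : Nat) :
    PySem.Chars.rfind.go s ['.'] n ≤ (n : Int) ∧
      (0 ≤ PySem.Chars.rfind.go s ['.'] n →
        ['.'].isPrefixOf (s.drop (PySem.Chars.rfind.go s ['.'] n).toNat) = true) := by
  induction n with
  | zero =>
    by_cases h : ['.'].isPrefixOf s = true <;> simp [PySem.Chars.rfind.go, h]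
  | succ m ih =>
    by_cases h : ['.'].isPrefixOf (s.drop (m+1)) = true
    · simp [PySem.Chars.rfind.go, h]
    · rw [show PySem.Chars.rfind.go s ['.'] (m+1) = PySem.Chars.rfind.go s ['.'] m by
        simp [PySem.Chars.rfind.go, h]]
      exact ⟨le_trans ih.1 (by omega), ih.2⟩

theorem pv_rfind_slice_lt (cid : String) (h : 0 ≤ PySem.Str.rfind cid ".") :
    (PySem.Str.slice cid none (some (PySem.Str.rfind cid "."))).toList.length < cid.toList.length := by
  have heq : PySem.Str.rfind cid "." = PySem.Chars.rfind cid.toList ['.'] := rfl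
  rw [heq] at h ⊢
  obtain ⟨-, hpre⟩ := pv_rfind_go_le cid.toList cid.toList.length
  have hpre' : ['.'].isPrefixOf
      (cid.toList.drop (PySem.Chars.rfind cid.toList ['.']).toNat) = true := hpre h
  have hlt : (PySem.Chars.rfind cid.toList ['.']).toNat < cid.toList.length := by
    by_contra hge
    rw [List.drop_eq_nil_of_le (by omega)] at hpre'
    simp [List.isPrefixOf] at hpre'
  rw [PySem.Str.slice, PySem.Chars.slice_eq_listSlice, PySem.List.slice_to _ h,
    String.toList_ofList, List.length_take]
  omega

-- _chain(cid): cid and all its dot-boundary prefixes, longest first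
def pvChain (cid : String) : List String :=
  let j := PySem.Str.rfind cid "."
  if h : 0 ≤ j then
    cid :: pvChain (PySem.Str.slice cid none (some j))
  else
    [cid]
termination_by cid.toList.length
decreasing_by exact pv_rfind_slice_lt cid h

def build_parent_prefixes_alt (cluster_ids : List String) : List String :=
  let all_prefixes : List String :=
    cluster_ids.flatMap (fun cid => if cid = "" then [] else pvChain cid)
  PySem.List.sorted2 (PySem.Set.ofList all_prefixes)
    (fun x => (PySem.Str.count x "." : Int)) (fun x => x)

-- ===== PRECONDITION & SPEC =====
def Spec_build_parent_prefixes (cluster_ids : List String) (out : List String) : Prop := out = build_parent_prefixes_alt cluster_ids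
instance (cluster_ids : List String) (out : List String) : Decidable (Spec_build_parent_prefixes cluster_ids out) := by unfold Spec_build_parent_prefixes; infer_instance

-- ===== CLAIM (what is proved, stated in full; the proofs are below) =====
def Claim_equal_build_parent_prefixes : Prop := ∀ (cluster_ids : List String), Dom_build_parent_prefixes cluster_ids → Spec_build_parent_prefixes cluster_ids (build_parent_prefixes cluster_ids)

-- ===== LEMMAS AND PROOFS =====

-- structural model of cid.split('.')
def pvSplitD : List Char → List (List Char)
  | [] => [[]]
  | c :: t => if c = '.' then [] :: pvSplitD t else (pvSplitD t).modifyHead (c :: ·)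

-- the common value: the dot-boundary prefixes of cs in order, ending with cs itself
def pvPfx : List Char → List (List Char)
  | [] => [[]]
  | c :: t => (if c = '.' then [[]] else []) ++ (pvPfx t).map (c :: ·)

theorem pvSplitD_ne_nil (cs : List Char) : pvSplitD cs ≠ [] := by
  induction cs with
  | nil => simp [pvSplitD]
  | cons c t ih =>
    simp only [pvSplitD]
    split_ifs
    · simp
    · cases h : pvSplitD t with
      | nil => exact absurd h ih
      | cons a l => simp

theorem pv_go_eq (fuel : Nat) : ∀ (l cur : List Char) (acc : List (List Char)), l.length ≤ fuel →
    PySem.Chars.splitOn.go ['.'] fuel l cur acc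
      = acc.reverse ++ (pvSplitD l).modifyHead (cur.reverse ++ ·) := by
  induction fuel with
  | zero =>
    intro l cur acc h
    have : l = [] := by cases l <;> simp_all
    subst this
    simp [PySem.Chars.splitOn.go, pvSplitD]
  | succ n ih =>
    intro l cur acc h
    cases l with
    | nil => simp [PySem.Chars.splitOn.go, pvSplitD]
    | cons c rest =>
      by_cases hc : c = '.'
      · subst hc
        have hgo : PySem.Chars.splitOn.go ['.'] (n+1) ('.' :: rest) cur acc
            = PySem.Chars.splitOn.go ['.'] n rest [] (cur.reverse :: acc) := by
          simp [PySem.Chars.splitOn.go, List.isPrefixOf]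
        rw [hgo, ih rest [] (cur.reverse :: acc) (by simp at h; omega)]
        cases hp : pvSplitD rest with
        | nil => exact absurd hp (pvSplitD_ne_nil rest)
        | cons a l => simp [pvSplitD, hp]
      · have hgo : PySem.Chars.splitOn.go ['.'] (n+1) (c :: rest) cur acc
            = PySem.Chars.splitOn.go ['.'] n rest (c :: cur) acc := by
          simp [PySem.Chars.splitOn.go, List.isPrefixOf,
            show ('.' : Char) ≠ c from fun h' => hc h'.symm]
        rw [hgo, ih rest (c :: cur) acc (by simp at h; omega)]
        cases hp : pvSplitD rest with
        | nil => exact absurd hp (pvSplitD_ne_nil rest)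
        | cons a l => simp [pvSplitD, hc, hp]

theorem pv_splitOn_eq (cs : List Char) : PySem.Chars.splitOn cs ['.'] = pvSplitD cs := by
  have h := pv_go_eq (cs.length + 1) cs [] [] (by omega)
  cases hp : pvSplitD cs with
  | nil => exact absurd hp (pvSplitD_ne_nil cs)
  | cons a l => simpa [PySem.Chars.splitOn, hp] using h

-- a cons on the head part passes through the join
theorem pv_join_cons_head (sep : List Char) (c : Char) (p : List Char) (r : List (List Char)) :
    PySem.Chars.join sep ((c :: p) :: r) = c :: PySem.Chars.join sep (p :: r) := by
  cases r with
  | nil => simp [PySem.Chars.join_singleton]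
  | cons q r' => simp [PySem.Chars.join_cons_cons]

-- A's join-of-every-take list is exactly the dot-prefix list
theorem pv_join_take (cs : List Char) :
    (List.range (pvSplitD cs).length).map
      (fun k => PySem.Chars.join ['.'] ((pvSplitD cs).take (k+1))) = pvPfx cs := by
  induction cs with
  | nil => simp [pvSplitD, pvPfx, PySem.Chars.join_singleton]
  | cons c t ih =>
    cases hp : pvSplitD t with
    | nil => exact absurd hp (pvSplitD_ne_nil t)
    | cons a l =>
      by_cases hc : c = '.'
      · subst hc
        have h1 : pvSplitD ('.' :: t) = [] :: a :: l := by simp [pvSplitD, hp]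
        have h2 : pvPfx ('.' :: t) = [] :: (pvPfx t).map ('.' :: ·) := by simp [pvPfx]
        rw [h1, h2, List.length_cons, List.range_succ_eq_map, List.map_cons, List.map_map]
        refine congrArg₂ _ (by simp [PySem.Chars.join_singleton]) ?_
        rw [← ih, hp, List.map_map]
        refine List.map_congr_left (fun k _ => ?_)
        simp [Function.comp, List.take_succ_cons, PySem.Chars.join_cons_cons]
      · have h1 : pvSplitD (c :: t) = (c :: a) :: l := by simp [pvSplitD, hc, hp]
        have h2 : pvPfx (c :: t) = (pvPfx t).map (c :: ·) := by simp [pvPfx, hc]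
        rw [h1, h2, ← ih, hp, List.map_map]
        refine List.map_congr_left (fun k _ => ?_)
        simp [Function.comp, List.take_succ_cons, pv_join_cons_head]

-- A's per-cid inner loop is a fold of adds over the dot-prefix list
theorem pv_stepA_eq (s : PySem.Set String) (cid : String) :
    (PySem.List.pyRange 1 (((PySem.Chars.splitOn cid.toList ['.']).length : Int) + 1) 1).foldl
        (fun s i => PySem.Set.add s
          (String.ofList (PySem.Chars.join ['.'] (PySem.List.slice (PySem.Chars.splitOn cid.toList ['.']) none (some i))))) s
      = ((pvPfx cid.toList).map String.ofList).foldl PySem.Set.add s := by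
  have hsplit := pv_splitOn_eq cid.toList
  rw [hsplit]
  have hn : 0 < (pvSplitD cid.toList).length :=
    List.length_pos_iff.mpr (pvSplitD_ne_nil cid.toList)
  rw [PySem.List.pyRange_of_pos _ _ (by norm_num),
    if_pos (by omega),
    show ((((pvSplitD cid.toList).length : Int) + 1 - 1 + 1 - 1) / 1).toNat
        = (pvSplitD cid.toList).length by simp]
  rw [List.foldl_map]
  rw [PySem.List.foldl_congr_mem (List.range (pvSplitD cid.toList).length) _
    (fun s k => PySem.Set.add s
      (String.ofList (PySem.Chars.join ['.'] ((pvSplitD cid.toList).take (k+1))))) s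
    (by
      intro acc k _
      have hs := PySem.List.slice_to (pvSplitD cid.toList) (b := 1 + 1 * (k : Int))
        (by positivity)
      simp only [hs, show (1 + 1 * (k : Int)).toNat = k + 1 by omega])]
  rw [← List.foldl_map (f := fun k => PySem.Chars.join ['.'] ((pvSplitD cid.toList).take (k+1)))
      (g := fun s x => PySem.Set.add s (String.ofList x))]
  rw [pv_join_take, List.foldl_map]

-- ---- rfind characterisation ----

theorem pv_go_spec (s : List Char) (n : Nat) :
    (PySem.Chars.rfind.go s ['.'] n = -1 ∧ ∀ k ≤ n, ¬ (['.'].isPrefixOf (s.drop k) = true))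
    ∨ (∃ j : Nat, PySem.Chars.rfind.go s ['.'] n = (j : Int) ∧ j ≤ n ∧
        ['.'].isPrefixOf (s.drop j) = true ∧
        ∀ k, j < k → k ≤ n → ¬ (['.'].isPrefixOf (s.drop k) = true)) := by
  induction n with
  | zero =>
    by_cases h : ['.'].isPrefixOf s = true
    · exact Or.inr ⟨0, by simpa [PySem.Chars.rfind.go, h], by omega, by simpa using h, by omega⟩
    · refine Or.inl ⟨by simp [PySem.Chars.rfind.go, h], ?_⟩
      intro k hk; interval_cases k; simpa using h
  | succ m ih =>
    by_cases h : ['.'].isPrefixOf (s.drop (m+1)) = true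
    · exact Or.inr ⟨m+1, by simp [PySem.Chars.rfind.go, h], le_refl _, h, by omega⟩
    · have hgo : PySem.Chars.rfind.go s ['.'] (m+1) = PySem.Chars.rfind.go s ['.'] m := by
        simp [PySem.Chars.rfind.go, h]
      rcases ih with ⟨h1, h2⟩ | ⟨j, h1, h2, h3, h4⟩
      · refine Or.inl ⟨hgo ▸ h1, fun k hk => ?_⟩
        rcases Nat.lt_or_ge k (m+1) with hk' | hk'
        · exact h2 k (by omega)
        · have : k = m + 1 := by omega
          subst this; exact h
      · refine Or.inr ⟨j, hgo ▸ h1, by omega, h3, fun k hjk hk => ?_⟩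
        rcases Nat.lt_or_ge k (m+1) with hk' | hk'
        · exact h4 k hjk (by omega)
        · have : k = m + 1 := by omega
          subst this; exact h

theorem pv_prefix_dot (t : List Char) :
    ['.'].isPrefixOf t = true ↔ ∃ u, t = '.' :: u := by
  cases t with
  | nil => simp [List.isPrefixOf]
  | cons c u =>
    simp only [List.isPrefixOf, Bool.and_true, beq_iff_eq]
    constructor
    · intro h; exact ⟨u, by rw [h]⟩
    · rintro ⟨u', h⟩; cases h; rfl

-- rfind = -1 : no dot anywhere
theorem pv_rfind_neg (cs : List Char) (h : PySem.Chars.rfind cs ['.'] < 0) :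
    ∀ c ∈ cs, c ≠ '.' := by
  rcases pv_go_spec cs cs.length with ⟨_, h2⟩ | ⟨j, h1, _, _, _⟩
  · intro c hc hc'
    subst hc'
    obtain ⟨k, hk, hget⟩ := List.mem_iff_getElem.mp hc
    refine h2 k (by omega) ?_
    rw [pv_prefix_dot]
    exact ⟨cs.drop (k+1), by rw [List.drop_eq_getElem_cons hk, hget]⟩
  · rw [PySem.Chars.rfind, h1] at h; omega

-- rfind = j ≥ 0 : cs decomposes around a last dot
theorem pv_rfind_pos (cs : List Char) (j : Nat) (h : PySem.Chars.rfind cs ['.'] = (j : Int)) :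
    j < cs.length ∧ cs = cs.take j ++ '.' :: cs.drop (j+1) ∧ ∀ c ∈ cs.drop (j+1), c ≠ '.' := by
  rcases pv_go_spec cs cs.length with ⟨h1, _⟩ | ⟨j', h1, _, h3, h4⟩
  · rw [PySem.Chars.rfind, h1] at h; omega
  · rw [PySem.Chars.rfind, h1] at h
    have hj : j = j' := by omega
    subst hj
    obtain ⟨u, hu⟩ := (pv_prefix_dot _).mp h3
    have hjlen : j < cs.length := by
      by_contra hge
      rw [List.drop_eq_nil_of_le (by omega)] at hu
      exact absurd hu (by simp)
    have hget := List.drop_eq_getElem_cons hjlen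
    have hinj : cs[j] = '.' := by
      have := hget.symm.trans hu
      exact (List.cons.injEq _ _ _ _ ▸ this).1
    have hdrop : cs.drop j = '.' :: cs.drop (j+1) := by
      rw [hget, hinj]
    refine ⟨hjlen, by rw [← hdrop, List.take_append_drop], ?_⟩
    intro c hc hc'
    subst hc'
    obtain ⟨k, hk, hget⟩ := List.mem_iff_getElem.mp hc
    rw [List.getElem_drop] at hget
    rw [List.length_drop] at hk
    refine h4 (j+1+k) (by omega) (by omega) ?_
    rw [pv_prefix_dot]
    exact ⟨cs.drop (j+1+k+1), by rw [List.drop_eq_getElem_cons (by omega), hget]⟩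

-- ---- pvPfx structure ----

theorem pvPfx_no_dot (cs : List Char) (h : ∀ c ∈ cs, c ≠ '.') : pvPfx cs = [cs] := by
  induction cs with
  | nil => simp [pvPfx]
  | cons c t ih =>
    have hc : c ≠ '.' := h c (by simp)
    rw [pvPfx, if_neg hc, ih (fun x hx => h x (by simp [hx]))]
    simp

theorem pvPfx_last_dot (u v : List Char) (hv : ∀ c ∈ v, c ≠ '.') :
    pvPfx (u ++ '.' :: v) = pvPfx u ++ [u ++ '.' :: v] := by
  induction u with
  | nil => simp [pvPfx, pvPfx_no_dot v hv]
  | cons c u' ih =>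
    simp only [List.cons_append, pvPfx, ih, List.map_append]
    simp

-- ---- pvChain = reversed prefix list ----

theorem pvChain_eq (cid : String) :
    pvChain cid = (((pvPfx cid.toList).map String.ofList)).reverse := by
  fun_induction pvChain cid with
  | case1 cid j h ih =>
    have heq : j = PySem.Chars.rfind cid.toList ['.'] := rfl
    have hj : PySem.Chars.rfind cid.toList ['.'] = ((j.toNat : Nat) : Int) := by
      rw [← heq]; omega
    obtain ⟨hlt, hdec, hnd⟩ := pv_rfind_pos cid.toList j.toNat hj
    have hslice : PySem.Str.slice cid none (some j)
        = String.ofList (cid.toList.take j.toNat) := by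
      rw [PySem.Str.slice, PySem.Chars.slice_eq_listSlice, PySem.List.slice_to _ h]
    rw [hslice] at ih
    rw [hslice, ih]
    conv_lhs => rw [String.toList_ofList]
    conv_rhs => rw [show cid.toList = cid.toList.take j.toNat ++ '.' :: cid.toList.drop (j.toNat+1) from hdec]
    rw [pvPfx_last_dot _ _ hnd, List.map_append, List.reverse_append]
    simp [← hdec, String.ofList_toList]
  | case2 cid j h =>
    have hneg : PySem.Chars.rfind cid.toList ['.'] < 0 := by
      have heq : j = PySem.Chars.rfind cid.toList ['.'] := rfl
      omega
    rw [pvPfx_no_dot cid.toList (pv_rfind_neg cid.toList hneg)]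
    simp [String.ofList_toList]

-- ---- membership and nodup ----

theorem pv_mem_foldl_add (L : List String) (s : PySem.Set String) (x : String) :
    x ∈ L.foldl PySem.Set.add s ↔ x ∈ s ∨ x ∈ L := by
  induction L generalizing s with
  | nil => simp
  | cons a t ih => simp [List.foldl_cons, ih, PySem.Set.mem_add]; tauto

theorem pv_nodup_foldl_add (L : List String) (s : PySem.Set String) (h : s.Nodup) :
    (L.foldl PySem.Set.add s).Nodup := by
  induction L generalizing s with
  | nil => exact h
  | cons a t ih => exact ih _ (PySem.Set.nodup_add s a h)

-- ---- the sort key is a strict total order; sorted2 is determined by the member set ----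

def pvBefore (a b : String) : Bool :=
  decide ((PySem.Str.count a "." : Int) < (PySem.Str.count b "." : Int)) ||
    (!decide ((PySem.Str.count b "." : Int) < (PySem.Str.count a "." : Int)) && decide (a < b))

theorem pvBefore_asymm (a b : String) (h : pvBefore a b = true) : pvBefore b a = false := by
  by_contra hh
  rw [Bool.not_eq_false] at hh
  simp only [pvBefore, Bool.or_eq_true, Bool.and_eq_true, Bool.not_eq_true', decide_eq_true_eq,
    decide_eq_false_iff_not] at h hh
  rcases h with h | ⟨h1, h2⟩ <;> rcases hh with g | ⟨g1, g2⟩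
  · omega
  · omega
  · omega
  · exact absurd h2 (not_lt_of_gt g2)

theorem pvBefore_trans (a b c : String) (h1 : pvBefore a b = true) (h2 : pvBefore b c = true) :
    pvBefore a c = true := by
  simp only [pvBefore, Bool.or_eq_true, Bool.and_eq_true, Bool.not_eq_true', decide_eq_true_eq,
    decide_eq_false_iff_not] at *
  rcases h1 with h1 | ⟨h1, h1'⟩ <;> rcases h2 with h2 | ⟨h2, h2'⟩
  · exact Or.inl (by omega)
  · exact Or.inl (by omega)
  · exact Or.inl (by omega)
  · exact Or.inr ⟨by omega, lt_trans h1' h2'⟩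

theorem pvBefore_total (a b : String) (h : a ≠ b) :
    pvBefore a b = true ∨ pvBefore b a = true := by
  simp only [pvBefore, Bool.or_eq_true, Bool.and_eq_true, Bool.not_eq_true', decide_eq_true_eq,
    decide_eq_false_iff_not]
  rcases lt_trichotomy (PySem.Str.count a "." : Int) (PySem.Str.count b "." : Int) with hk | hk | hk
  · exact Or.inl (Or.inl hk)
  · rcases lt_or_gt_of_ne h with hab | hab
    · exact Or.inl (Or.inr ⟨by omega, hab⟩)
    · exact Or.inr (Or.inr ⟨by omega, hab⟩)
  · exact Or.inr (Or.inl hk)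

theorem pv_pairwise_insertBy (x : String) (l : List String)
    (hl : l.Pairwise (fun a b => pvBefore b a = false)) :
    (PySem.List.insertBy pvBefore x l).Pairwise (fun a b => pvBefore b a = false) := by
  induction l with
  | nil => simp [PySem.List.insertBy]
  | cons y ys ih =>
    rw [List.pairwise_cons] at hl
    obtain ⟨hy, hys⟩ := hl
    by_cases h : pvBefore x y = true
    · rw [show PySem.List.insertBy pvBefore x (y :: ys) = x :: y :: ys by
        simp [PySem.List.insertBy, h]]
      refine List.pairwise_cons.mpr ⟨?_, List.pairwise_cons.mpr ⟨hy, hys⟩⟩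
      intro z hz
      rcases List.mem_cons.mp hz with rfl | hz'
      · exact pvBefore_asymm _ _ h
      · by_contra hzx
        rw [Bool.not_eq_false] at hzx
        have := pvBefore_trans z x y hzx h
        rw [hy z hz'] at this
        exact absurd this (by simp)
    · rw [show PySem.List.insertBy pvBefore x (y :: ys) = y :: PySem.List.insertBy pvBefore x ys by
        simp [PySem.List.insertBy, h]]
      refine List.pairwise_cons.mpr ⟨?_, ih hys⟩
      intro z hz
      rcases (PySem.List.mem_insertBy _ _ _ _).mp hz with rfl | hz'
      · simpa using h
      · exact hy z hz'

theorem pv_pairwise_foldl (xs : List String) (acc : List String)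
    (h : acc.Pairwise (fun a b => pvBefore b a = false)) :
    (xs.foldl (fun acc x => PySem.List.insertBy pvBefore x acc) acc).Pairwise
      (fun a b => pvBefore b a = false) := by
  induction xs generalizing acc with
  | nil => exact h
  | cons x t ih => exact ih _ (pv_pairwise_insertBy x acc h)

theorem pv_sorted2_eq_foldl (xs : List String) :
    PySem.List.sorted2 xs (fun x => (PySem.Str.count x "." : Int)) (fun x => x)
      = xs.foldl (fun acc x => PySem.List.insertBy pvBefore x acc) [] := rfl

theorem pv_sorted2_congr (s t : List String) (hs : s.Nodup) (ht : t.Nodup)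
    (h : ∀ x, x ∈ s ↔ x ∈ t) :
    PySem.List.sorted2 s (fun x => (PySem.Str.count x "." : Int)) (fun x => x)
      = PySem.List.sorted2 t (fun x => (PySem.Str.count x "." : Int)) (fun x => x) := by
  have hperm : s.Perm t := (List.perm_ext_iff_of_nodup hs ht).mpr h
  have hp : (PySem.List.sorted2 s (fun x => (PySem.Str.count x "." : Int)) (fun x => x)).Perm
      (PySem.List.sorted2 t (fun x => (PySem.Str.count x "." : Int)) (fun x => x)) :=
    ((PySem.List.sorted2_perm s _ _ false).trans hperm).trans
      (PySem.List.sorted2_perm t _ _ false).symm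
  refine List.Perm.eq_of_pairwise (le := fun a b => pvBefore b a = false) ?_ ?_ ?_ hp
  · intro a b _ _ hab hba
    by_contra hne
    rcases pvBefore_total a b hne with hx | hx
    · rw [hba] at hx; exact absurd hx (by simp)
    · rw [hab] at hx; exact absurd hx (by simp)
  · rw [pv_sorted2_eq_foldl]; exact pv_pairwise_foldl s [] (by simp)
  · rw [pv_sorted2_eq_foldl]; exact pv_pairwise_foldl t [] (by simp)

-- ---- assembling both sides ----

theorem pv_mem_A (ids : List String) (s : PySem.Set String) (x : String) :
    x ∈ ids.foldl (fun s cid =>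
      if cid = "" then s
      else
        (PySem.List.pyRange 1 (((PySem.Chars.splitOn cid.toList ['.']).length : Int) + 1) 1).foldl
          (fun s i => PySem.Set.add s
            (String.ofList (PySem.Chars.join ['.'] (PySem.List.slice (PySem.Chars.splitOn cid.toList ['.']) none (some i))))) s) s
    ↔ x ∈ s ∨ ∃ cid ∈ ids, cid ≠ "" ∧ x ∈ (pvPfx cid.toList).map String.ofList := by
  induction ids generalizing s with
  | nil => simp
  | cons cid t ih =>
    rw [List.foldl_cons]
    by_cases hne : cid = ""
    · rw [if_pos hne, ih]
      subst hne
      simp only [List.mem_cons]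
      constructor
      · rintro (hx | ⟨c, hc, hcne, hcx⟩)
        · exact Or.inl hx
        · exact Or.inr ⟨c, Or.inr hc, hcne, hcx⟩
      · rintro (hx | ⟨c, rfl | hc, hcne, hcx⟩)
        · exact Or.inl hx
        · exact absurd rfl hcne
        · exact Or.inr ⟨c, hc, hcne, hcx⟩
    · rw [if_neg hne, ih, pv_stepA_eq, pv_mem_foldl_add]
      simp only [List.mem_cons]
      constructor
      · rintro ((hx | hx) | ⟨c, hc, hcne, hcx⟩)
        · exact Or.inl hx
        · exact Or.inr ⟨cid, Or.inl rfl, hne, hx⟩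
        · exact Or.inr ⟨c, Or.inr hc, hcne, hcx⟩
      · rintro (hx | ⟨c, rfl | hc, hcne, hcx⟩)
        · exact Or.inl (Or.inl hx)
        · exact Or.inl (Or.inr hcx)
        · exact Or.inr ⟨c, hc, hcne, hcx⟩

theorem pv_nodup_A (ids : List String) (s : PySem.Set String) (h : s.Nodup) :
    (ids.foldl (fun s cid =>
      if cid = "" then s
      else
        (PySem.List.pyRange 1 (((PySem.Chars.splitOn cid.toList ['.']).length : Int) + 1) 1).foldl
          (fun s i => PySem.Set.add s
            (String.ofList (PySem.Chars.join ['.'] (PySem.List.slice (PySem.Chars.splitOn cid.toList ['.']) none (some i))))) s) s).Nodup := by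
  induction ids generalizing s with
  | nil => exact h
  | cons cid t ih =>
    rw [List.foldl_cons]
    by_cases hne : cid = ""
    · rw [if_pos hne]; exact ih _ h
    · rw [if_neg hne, pv_stepA_eq]
      exact ih _ (pv_nodup_foldl_add _ _ h)

-- ===== VERDICT (by name: the statement is the Claim_ definition above) =====
theorem build_parent_prefixes_spec : Claim_equal_build_parent_prefixes := by
  intro cluster_ids _
  unfold Spec_build_parent_prefixes build_parent_prefixes build_parent_prefixes_alt
  refine pv_sorted2_congr _ _ ?_ ?_ ?_
  · exact pv_nodup_A cluster_ids PySem.Set.empty (by simp [PySem.Set.empty])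
  · exact PySem.Set.nodup_ofList _
  · intro x
    rw [pv_mem_A]
    simp only [PySem.Set.mem_ofList, List.mem_flatMap, PySem.Set.empty, List.not_mem_nil,
      false_or]
    constructor
    · rintro ⟨cid, hcid, hne, hx⟩
      exact ⟨cid, hcid, by rw [if_neg hne, pvChain_eq]; simpa using hx⟩
    · rintro ⟨cid, hcid, hx⟩
      by_cases hne : cid = ""
      · rw [if_pos hne] at hx; simp at hx
      · rw [if_neg hne, pvChain_eq] at hx
        exact ⟨cid, hcid, hne, by simpa using hx⟩
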